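-- pv_equiv track=rewrite | github.com/huangweijing/weo_leetcode | 2395_Find_Subarrays_With_Equal_Sum.py | findSubarrays
-- ===== SOURCE A (Python) =====
-- from typing import List
--
-- def findSubarrays(nums: List[int]) -> bool:
--     equal_set = set[int]()
--     for i in range(1, len(nums)):
--         val = nums[i] + nums[i - 1]
--         if val in equal_set:
--             return True
--         equal_set.add(val)
--     return False
-- ===== SOURCE B (Python) =====
-- from typing import List
--
-- def findSubarrays(nums: List[int]) -> bool:
--     sums = sorted(nums[i] + nums[i - 1] for i in range(1, len(nums)))
--     for a, b in zip(sums, sums[1:]):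
--         if a == b:
--             return True
--     return False
-- ===== Notes on version B (the rewrite author's own statement) =====
-- stated objective: alternative
-- what changed: Replaces A's hash-set duplicate detection with sort-then-scan: build the adjacent-pair sums, sort them, and check whether any two neighbours in the sorted list are equal.
import Mathlib
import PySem

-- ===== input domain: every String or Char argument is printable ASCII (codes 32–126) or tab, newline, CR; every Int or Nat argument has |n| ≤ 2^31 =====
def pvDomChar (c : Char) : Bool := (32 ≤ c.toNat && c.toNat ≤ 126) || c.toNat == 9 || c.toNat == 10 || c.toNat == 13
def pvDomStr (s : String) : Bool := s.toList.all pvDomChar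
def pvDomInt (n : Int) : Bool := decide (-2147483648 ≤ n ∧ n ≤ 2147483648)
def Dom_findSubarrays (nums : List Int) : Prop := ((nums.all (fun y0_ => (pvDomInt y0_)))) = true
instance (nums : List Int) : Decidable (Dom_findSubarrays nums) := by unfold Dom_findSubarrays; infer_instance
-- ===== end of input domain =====

-- B replaces A's hash-set duplicate scan with sort-then-scan over the adjacent-pair sums;
-- objective: alternative algorithm.

-- ===== PORT A =====
-- the loop 'for i in range(1, len(nums))' with early 'return True'; indices produced by the
-- range are always in bounds, so '.getD 0' for nums[i] is exact here
def findSubarraysLoop (nums : List Int) : List Int → PySem.Set Int → Bool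
  | [], _ => false
  | i :: rest, equalSet =>
    let val := (PySem.List.pyGet? nums i).getD 0 + (PySem.List.pyGet? nums (i - 1)).getD 0
    if PySem.Set.contains equalSet val then true
    else findSubarraysLoop nums rest (PySem.Set.add equalSet val)

def findSubarrays (nums : List Int) : Bool :=
  findSubarraysLoop nums (PySem.List.pyRange 1 (nums.length) 1) PySem.Set.empty

-- ===== PORT B =====
-- 'for a, b in zip(sums, sums[1:]): if a == b: return True' as recursion on the sorted list
def adjEqLoop : List Int → Bool
  | a :: b :: rest => if a == b then true else adjEqLoop (b :: rest)
  | _ => false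

def findSubarrays_alt (nums : List Int) : Bool :=
  let sums := (PySem.List.pyRange 1 (nums.length) 1).map
    (fun i => (PySem.List.pyGet? nums i).getD 0 + (PySem.List.pyGet? nums (i - 1)).getD 0)
  adjEqLoop (PySem.List.sorted sums (fun x => x) false)

-- ===== PRECONDITION & SPEC =====
def Spec_findSubarrays (nums : List Int) (out : Bool) : Prop := out = findSubarrays_alt nums
instance (nums : List Int) (out : Bool) : Decidable (Spec_findSubarrays nums out) := by unfold Spec_findSubarrays; infer_instance

-- ===== CLAIM (what is proved, stated in full; the proofs are below) =====
def Claim_equal_findSubarrays : Prop := ∀ (nums : List Int), Dom_findSubarrays nums → Spec_findSubarrays nums (findSubarrays nums)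

-- ===== LEMMAS AND PROOFS =====

-- generic form of A's loop over the list of already-computed sums
def dupLoop : List Int → PySem.Set Int → Bool
  | [], _ => false
  | v :: rest, s =>
    if PySem.Set.contains s v then true else dupLoop rest (PySem.Set.add s v)

theorem findSubarraysLoop_eq_dupLoop (nums : List Int) (is : List Int) (s : PySem.Set Int) :
    findSubarraysLoop nums is s =
      dupLoop (is.map (fun i => (PySem.List.pyGet? nums i).getD 0 +
        (PySem.List.pyGet? nums (i - 1)).getD 0)) s := by
  induction is generalizing s with
  | nil => rfl
  | cons i rest ih => simp only [findSubarraysLoop, dupLoop, List.map_cons]; split <;> simp [ih]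

-- A's loop returns true iff the sums list has a duplicate or meets the seed set
theorem dupLoop_true_iff (l : List Int) (s : PySem.Set Int) :
    dupLoop l s = true ↔ ¬ l.Nodup ∨ ∃ x ∈ l, x ∈ s := by
  induction l generalizing s with
  | nil => simp [dupLoop]
  | cons v rest ih =>
    by_cases hm : v ∈ s
    · simp [dupLoop, PySem.Set.contains, hm]
      try exact Or.inr ⟨v, Or.inl rfl, hm⟩
    · have hadd : ∀ x, x ∈ PySem.Set.add s v ↔ x = v ∨ x ∈ s := by
        intro x; rw [PySem.Set.mem_add]; exact or_comm
      simp only [dupLoop, PySem.Set.contains, List.contains_eq_mem, hm, decide_false,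
        Bool.false_eq_true, if_false, ih, List.nodup_cons]
      constructor
      · rintro (h | ⟨x, hx, hxs⟩)
        · exact Or.inl (fun ⟨_, h2⟩ => h h2)
        · rcases (hadd x).mp hxs with rfl | hxs'
          · exact Or.inl (fun ⟨h1, _⟩ => h1 hx)
          · exact Or.inr ⟨x, List.mem_cons_of_mem _ hx, hxs'⟩
      · rintro (h | ⟨x, hx, hxs⟩)
        · by_cases hvr : v ∈ rest
          · exact Or.inr ⟨v, hvr, (hadd v).mpr (Or.inl rfl)⟩
          · exact Or.inl (fun h2 => h ⟨hvr, h2⟩)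
        · rcases List.mem_cons.mp hx with rfl | hx
          · exact absurd hxs hm
          · exact Or.inr ⟨x, hx, (hadd x).mpr (Or.inr hxs)⟩

-- on a ≤-sorted list, an equal adjacent pair exists iff the list has a duplicate
theorem adjEqLoop_true_iff (l : List Int) (h : l.Pairwise (· ≤ ·)) :
    adjEqLoop l = true ↔ ¬ l.Nodup := by
  induction l with
  | nil => simp [adjEqLoop]
  | cons a t ih =>
    cases t with
    | nil => simp [adjEqLoop]
    | cons b rest =>
      rcases List.pairwise_cons.mp h with ⟨hale, htp⟩
      by_cases hab : a = b
      · subst hab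
        simp [adjEqLoop, List.nodup_cons]
      · have hane : a ∉ b :: rest := by
          have hab' : a < b := lt_of_le_of_ne (hale b (List.mem_cons_self)) hab
          intro hmem
          have : b ≤ a := by
            rcases List.mem_cons.mp hmem with rfl | hmem
            · exact le_refl a
            · exact (List.pairwise_cons.mp htp).1 a hmem
          omega
        have : adjEqLoop (a :: b :: rest) = adjEqLoop (b :: rest) := by
          simp [adjEqLoop, hab]
        rw [this, ih htp]
        simp [List.nodup_cons, hane]

-- ===== VERDICT (by name: the statement is the Claim_ definition above) =====
theorem findSubarrays_spec : Claim_equal_findSubarrays := by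
  intro nums _
  unfold Spec_findSubarrays findSubarrays findSubarrays_alt
  rw [findSubarraysLoop_eq_dupLoop]
  set sums := (PySem.List.pyRange 1 (nums.length) 1).map
    (fun i => (PySem.List.pyGet? nums i).getD 0 + (PySem.List.pyGet? nums (i - 1)).getD 0) with hs
  have hperm : (PySem.List.sorted sums (fun x => x) false).Perm sums := PySem.List.sorted_perm _ _ _
  have h1 : dupLoop sums PySem.Set.empty = true ↔ ¬ sums.Nodup := by
    rw [dupLoop_true_iff]; simp [PySem.Set.empty]
  have h2 : adjEqLoop (PySem.List.sorted sums (fun x => x) false) = true ↔ ¬ sums.Nodup := by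
    rw [adjEqLoop_true_iff _ (by simpa using PySem.List.sorted_pairwise sums (fun x => x))]
    rw [hperm.nodup_iff]
  rw [Bool.eq_iff_iff]
  exact h1.trans h2.symm
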